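-- pv_equiv track=rewrite | github.com/chadheyne/project-euler | problem149.py | traverse_square
-- ===== SOURCE A (Python) =====
-- from collections import deque
--
-- def pseudo_random(num_rows=2000, per_row=2000):
--     trail_55, trail_24 = deque(), deque()
--
--     for number in range(1, num_rows * per_row + 1):
--         if number <= 55:
--             base = (100003 - 200003 * number + 300007 * number ** 3) % 1000000 - 500000
--             trail_55.append(base)
--             if number >= 32:
--                 trail_24.append(base)
--             if number == 10:
--                 yield -393027
--             else:
--                 yield base
--         else:
--             base = (trail_24.popleft() + trail_55.popleft() + 1000000) % 1000000 - 500000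
--             trail_24.append(base)
--             trail_55.append(base)
--             if number == 100:
--                 yield 86613
--             else:
--                 yield base
--
-- def max_subsequence(sequence):
--     temp_max, total_max = 0, 0
--     for number in sequence:
--         temp_max = max(temp_max + number, 0)
--         total_max = max(temp_max, total_max)
--     return total_max
--
-- def traverse_square(grid_size=2000, row_size=2000):
--     grid_gen = pseudo_random(grid_size, row_size)
--     grid = [[next(grid_gen) for i in range(row_size)] for j in range(grid_size)]
--
--     for row in grid:
--         yield max_subsequence(row)
--
--     for column in range(grid_size):
--         yield max_subsequence((r[column] for r in grid))
--
--     for i in range(grid_size):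
--         if i > 0:
--             col_check = (grid[j + i][j] for j in range(grid_size - i))
--             yield max_subsequence(col_check)
--         row_check = (grid[j][j + i] for j in range(grid_size - i))
--         yield max_subsequence(row_check)
--
--     for i in range(grid_size):
--         if i > 0:
--             row_check = (grid[grid_size - 1 - j][i + j] for j in range(grid_size - i))
--             yield max_subsequence(row_check)
--
--         col_check = (grid[i - j][j] for j in range(i + 1))
--         yield max_subsequence(col_check)
-- ===== SOURCE B (Python) =====
-- from collections import deque
--
--
-- def pseudo_random(num_rows=2000, per_row=2000):
--     trail_55, trail_24 = deque(), deque()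
--
--     for number in range(1, num_rows * per_row + 1):
--         if number <= 55:
--             base = (100003 - 200003 * number + 300007 * number ** 3) % 1000000 - 500000
--             trail_55.append(base)
--             if number >= 32:
--                 trail_24.append(base)
--             if number == 10:
--                 yield -393027
--             else:
--                 yield base
--         else:
--             base = (trail_24.popleft() + trail_55.popleft() + 1000000) % 1000000 - 500000
--             trail_24.append(base)
--             trail_55.append(base)
--             if number == 100:
--                 yield 86613
--             else:
--                 yield base
--
--
-- def max_subsequence(sequence):
--     temp_max, total_max = 0, 0
--     for number in sequence:
--         temp_max = max(temp_max + number, 0)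
--         total_max = max(temp_max, total_max)
--     return total_max
--
--
-- def traverse_square(grid_size=2000, row_size=2000):
--     grid_gen = pseudo_random(grid_size, row_size)
--     grid = [[next(grid_gen) for i in range(row_size)] for j in range(grid_size)]
--
--     # One pass over the square bucketing every cell into its column,
--     # down-right diagonal (key c - r) and anti-diagonal (key r + c).
--     cols, diag_dr, diag_ad = {}, {}, {}
--     for r in range(grid_size):
--         row = grid[r]
--         for c in range(grid_size):
--             v = row[c]
--             cols.setdefault(c, []).append(v)
--             diag_dr.setdefault(c - r, []).append(v)
--             diag_ad.setdefault(r + c, []).append(v)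
--
--     out = [max_subsequence(row) for row in grid]
--     out += [max_subsequence(cols[c]) for c in range(grid_size)]
--     if grid_size > 0:
--         out.append(max_subsequence(diag_dr[0]))
--         for i in range(1, grid_size):
--             out.append(max_subsequence(diag_dr[-i]))
--             out.append(max_subsequence(diag_dr[i]))
--         out.append(max_subsequence(diag_ad[0][::-1]))
--         for i in range(1, grid_size):
--             out.append(max_subsequence(diag_ad[grid_size - 1 + i][::-1]))
--             out.append(max_subsequence(diag_ad[i][::-1]))
--     return out
-- ===== Notes on version B (the rewrite author's own statement) =====
-- stated objective: alternative
-- what changed: A re-walks the grid once per output line with per-line generator scans; B makes one pass over the square, bucketing every cell into its column, down-right diagonal (key c-r) and anti-diagonal (key r+c) dicts of lists, then runs max_subsequence on the buckets in A's emission order (anti-diagonal buckets reversed).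
import Mathlib
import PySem

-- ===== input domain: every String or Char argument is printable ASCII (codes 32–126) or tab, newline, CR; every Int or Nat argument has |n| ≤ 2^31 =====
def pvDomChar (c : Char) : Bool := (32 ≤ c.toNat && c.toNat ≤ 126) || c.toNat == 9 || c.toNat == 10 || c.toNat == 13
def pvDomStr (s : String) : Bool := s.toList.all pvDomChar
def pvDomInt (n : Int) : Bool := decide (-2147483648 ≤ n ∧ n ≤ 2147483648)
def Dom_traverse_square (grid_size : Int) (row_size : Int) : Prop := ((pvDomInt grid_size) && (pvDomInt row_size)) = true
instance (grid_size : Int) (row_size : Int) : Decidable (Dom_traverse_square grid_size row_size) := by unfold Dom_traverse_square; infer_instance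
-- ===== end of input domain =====

-- B replaces A's per-line generator re-scans of the square by ONE pass that buckets every
-- cell into its column / down-right diagonal / anti-diagonal (dicts of lists), then runs
-- max_subsequence on each bucket in A's emission order (objective: alternative).
-- A and B are generators in Python; the ports return the list of yielded values.

-- ===== PORT A =====
-- shared helper: pseudo_random, identical source text in Source A and Source B.
-- The generator is consumed LAZILY by the grid build: exactly max(num_rows,0)*max(per_row,0)
-- values are ever drawn (0 when either size is ≤ 0), so the port materializes exactly that
-- prefix of the stream (= the full range when both sizes are positive).
-- The two deques are provably nonempty whenever number > 55 (55 resp. 24 pushes before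
-- the first pop, one push per pop after), so 'headD 0'/'tail' is exact for popleft.
def pvPseudoRandom (num_rows : Int) (per_row : Int) : List Int :=
  ((PySem.List.pyRange 1 ((num_rows.toNat * per_row.toNat : Nat) + 1) 1).foldl
    (fun (st : List Int × List Int × List Int) number =>
      if number ≤ 55 then
        let base := PySem.Int.mod (100003 - 200003 * number + 300007 * number ^ 3) 1000000 - 500000
        (st.1 ++ [base],
         (if number ≥ 32 then st.2.1 ++ [base] else st.2.1),
         (if number = 10 then -393027 :: st.2.2 else base :: st.2.2))
      else
        let base := PySem.Int.mod (st.2.1.headD 0 + st.1.headD 0 + 1000000) 1000000 - 500000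
        (st.1.tail ++ [base], st.2.1.tail ++ [base],
         (if number = 100 then 86613 :: st.2.2 else base :: st.2.2)))
    ([], [], [])).2.2.reverse

-- shared helper: the grid build '[[next(gen) for i in range(row_size)] for j in range(grid_size)]',
-- identical source text in Source A and Source B.  Sequential consumption of the generator is exact:
-- row j consumes values j*row_size .. j*row_size+row_size-1 of the stream.
def pvGrid (grid_size : Int) (row_size : Int) : List (List Int) :=
  let vals := pvPseudoRandom grid_size row_size
  ((PySem.List.pyRange 0 grid_size 1).foldl
    (fun (st : List (List Int) × List Int) _ =>
      (st.1 ++ [st.2.take row_size.toNat], st.2.drop row_size.toNat))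
    ([], vals)).1

-- the yielded stream is accumulated in reverse (cons) and reversed once at the end,
-- the list idiom for a Python 'yield' loop.

-- shared helper: max_subsequence, identical source text in Source A and Source B.
def pvMaxSub (sequence : List Int) : Int :=
  (sequence.foldl (fun (p : Int × Int) number =>
    (max (p.1 + number) 0, max (max (p.1 + number) 0) p.2)) (0, 0)).2

-- all index accesses are in range on Pre_ (grid_size ≤ row_size), so pyGetD's default is never read
def traverse_square (grid_size : Int) (row_size : Int) : List Int :=
  let grid := pvGrid grid_size row_size
  let out1 := grid.foldl (fun acc row => acc ++ [pvMaxSub row]) []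
  let out2 := (PySem.List.pyRange 0 grid_size 1).foldl
    (fun acc column => acc ++ [pvMaxSub (grid.map (fun r => PySem.List.pyGetD r column 0))]) out1
  let out3 := (PySem.List.pyRange 0 grid_size 1).foldl
    (fun acc i =>
      (if i > 0 then
        acc ++ [pvMaxSub ((PySem.List.pyRange 0 (grid_size - i) 1).map
          (fun j => PySem.List.pyGetD (PySem.List.pyGetD grid (j + i) []) j 0))]
      else acc)
      ++ [pvMaxSub ((PySem.List.pyRange 0 (grid_size - i) 1).map
          (fun j => PySem.List.pyGetD (PySem.List.pyGetD grid j []) (j + i) 0))]) out2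
  (PySem.List.pyRange 0 grid_size 1).foldl
    (fun acc i =>
      (if i > 0 then
        acc ++ [pvMaxSub ((PySem.List.pyRange 0 (grid_size - i) 1).map
          (fun j => PySem.List.pyGetD (PySem.List.pyGetD grid (grid_size - 1 - j) []) (i + j) 0))]
      else acc)
      ++ [pvMaxSub ((PySem.List.pyRange 0 (i + 1) 1).map
          (fun j => PySem.List.pyGetD (PySem.List.pyGetD grid (i - j) []) j 0))]) out3

-- ===== PORT B =====
-- one pass over the square: bucket each cell into its column (key c), down-right diagonal
-- (key c - r) and anti-diagonal (key r + c); 'setdefault(k, []).append(v)' is Dict.modify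
-- with default []; 'ad[...][::-1]' is List.reverse (PySem.List.slice?_none_none_neg_one).
def traverse_square_alt (grid_size : Int) (row_size : Int) : List Int :=
  let grid := pvGrid grid_size row_size
  let bs := (PySem.List.pyRange 0 grid_size 1).foldl
    (fun (st : PySem.Dict Int (List Int) × PySem.Dict Int (List Int) × PySem.Dict Int (List Int)) r =>
      (PySem.List.pyRange 0 grid_size 1).foldl
        (fun st c =>
          let v := PySem.List.pyGetD (PySem.List.pyGetD grid r []) c 0
          (st.1.modify c [] (fun b => b ++ [v]),
           st.2.1.modify (c - r) [] (fun b => b ++ [v]),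
           st.2.2.modify (r + c) [] (fun b => b ++ [v]))) st)
    (PySem.Dict.empty, PySem.Dict.empty, PySem.Dict.empty)
  let out := grid.map pvMaxSub
  let out := out ++ (PySem.List.pyRange 0 grid_size 1).map (fun c => pvMaxSub (bs.1.getD c []))
  if grid_size > 0 then
    let out := out ++ [pvMaxSub (bs.2.1.getD 0 [])]
    let out := (PySem.List.pyRange 1 grid_size 1).foldl
      (fun acc i => acc ++ [pvMaxSub (bs.2.1.getD (-i) [])] ++ [pvMaxSub (bs.2.1.getD i [])]) out
    let out := out ++ [pvMaxSub ((bs.2.2.getD 0 []).reverse)]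
    (PySem.List.pyRange 1 grid_size 1).foldl
      (fun acc i => acc ++ [pvMaxSub ((bs.2.2.getD (grid_size - 1 + i) []).reverse)]
                        ++ [pvMaxSub ((bs.2.2.getD i []).reverse)]) out
  else out

-- ===== PRECONDITION & SPEC =====
-- A raises IndexError exactly when 0 < grid_size and row_size < grid_size (a column/diagonal
-- index then leaves a row); Pre_ excludes exactly those inputs (B raises there too).
def Pre_traverse_square (grid_size : Int) (row_size : Int) : Prop :=
  grid_size ≤ 0 ∨ grid_size ≤ row_size
instance (grid_size : Int) (row_size : Int) : Decidable (Pre_traverse_square grid_size row_size) := by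
  unfold Pre_traverse_square; infer_instance
def pvWitness_traverse_square : Int × Int := (3, 4)

def Spec_traverse_square (grid_size : Int) (row_size : Int) (out : List Int) : Prop := out = traverse_square_alt grid_size row_size
instance (grid_size : Int) (row_size : Int) (out : List Int) : Decidable (Spec_traverse_square grid_size row_size out) := by unfold Spec_traverse_square; infer_instance

-- ===== CLAIM (what is proved, stated in full; the proofs are below) =====
def Claim_equal_traverse_square : Prop := ∀ (grid_size : Int) (row_size : Int), Dom_traverse_square grid_size row_size → Pre_traverse_square grid_size row_size → Spec_traverse_square grid_size row_size (traverse_square grid_size row_size)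

-- ===== LEMMAS AND PROOFS =====

-- the cells of the square in B's traversal order
def pvCells (gs : Int) : List (Int × Int) :=
  (PySem.List.pyRange 0 gs 1).flatMap (fun r => (PySem.List.pyRange 0 gs 1).map (fun c => (r, c)))

theorem pv_foldl_nested {α β σ : Type} (l1 : List α) (l2 : List β) (f : σ → α → β → σ) (init : σ) :
    l1.foldl (fun s r => l2.foldl (fun s' c => f s' r c) s) init
      = (l1.flatMap (fun r => l2.map (fun c => (r, c)))).foldl (fun s rc => f s rc.1 rc.2) init := by
  rw [List.foldl_flatMap]
  simp [List.foldl_map]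

theorem pv_foldl_prod3 {α σ1 σ2 σ3 : Type} (l : List α) (f1 : σ1 → α → σ1) (f2 : σ2 → α → σ2)
    (f3 : σ3 → α → σ3) (a : σ1) (b : σ2) (c : σ3) :
    l.foldl (fun s x => (f1 s.1 x, f2 s.2.1 x, f3 s.2.2 x)) (a, b, c)
      = (l.foldl f1 a, l.foldl f2 b, l.foldl f3 c) := by
  induction l generalizing a b c with
  | nil => rfl
  | cons x t ih => simpa using ih (f1 a x) (f2 b x) (f3 c x)

theorem pv_getD_bucketFold {α : Type} (l : List α) (key v : α → Int) (q : Int) :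
    (l.foldl (fun d x => d.modify (key x) [] (fun b => b ++ [v x])) PySem.Dict.empty).getD q []
      = (l.filter (fun x => key x == q)).map v := by
  have h := PySem.Dict.getD_foldl_modify_append (l.map (fun x => (key x, v x))) PySem.Dict.empty q
  rw [List.foldl_map] at h
  simpa [PySem.Dict.getD_empty, List.filter_map, List.map_map, Function.comp_def] using h

theorem pv_filter_pyRange_eq (a b t : Int) :
    (PySem.List.pyRange a b 1).filter (fun c => c == t) = if a ≤ t ∧ t < b then [t] else [] := by
  split
  · next h =>
    rw [List.filter_beq, List.count_eq_one_of_mem (PySem.List.nodup_pyRange_one a b)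
      (PySem.List.mem_pyRange_one.mpr h)]
    rfl
  · next h =>
    rw [List.filter_eq_nil_iff]
    intro c hc
    simp only [beq_iff_eq]
    rintro rfl
    exact h (PySem.List.mem_pyRange_one.mp hc)

theorem pv_cells_filter_map (gs q : Int) (k g : Int → Int → Int) :
    ((pvCells gs).filter (fun rc => k rc.1 rc.2 == q)).map (fun rc => g rc.1 rc.2)
      = (PySem.List.pyRange 0 gs 1).flatMap
          (fun r => ((PySem.List.pyRange 0 gs 1).filter (fun c => k r c == q)).map (fun c => g r c)) := by
  unfold pvCells
  rw [List.filter_flatMap, List.map_flatMap]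
  simp [List.filter_map, List.map_map, Function.comp_def]

theorem pv_range_reverse (m : Nat) :
    (List.range m).reverse = (List.range m).map (fun k => m - 1 - k) := by
  apply List.ext_getElem
  · simp
  · intro i h1 h2
    simp [List.getElem_reverse]

theorem pv_reverse_map_pyRange (a b : Int) (f : Int → Int) :
    ((PySem.List.pyRange a b 1).map f).reverse
      = (PySem.List.pyRange a b 1).map (fun x => f (a + b - 1 - x)) := by
  rw [PySem.List.pyRange_one a b, List.map_map, ← List.map_reverse, pv_range_reverse]
  rw [List.map_map, List.map_map]
  apply List.map_congr_left
  intro k hk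
  have hk' := List.mem_range.mp hk
  simp only [Function.comp_apply]
  congr 1
  have hb : ((b - a).toNat : Int) = b - a := Int.toNat_of_nonneg (by omega)
  omega

-- bucket characterizations (generic in the cell-value function g)
theorem pv_cols_bucket (gs q : Int) (h0 : 0 ≤ q) (hq : q < gs) (g : Int → Int → Int) :
    ((pvCells gs).filter (fun rc => rc.2 == q)).map (fun rc => g rc.1 rc.2)
      = (PySem.List.pyRange 0 gs 1).map (fun r => g r q) := by
  rw [pv_cells_filter_map gs q (fun _ c => c) g]
  simp only [pv_filter_pyRange_eq, if_pos (And.intro h0 hq)]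
  simp [List.map_eq_flatMap]

theorem pv_dd_bucket_pos (gs i : Int) (h0 : 0 ≤ i) (hi : i < gs) (g : Int → Int → Int) :
    ((pvCells gs).filter (fun rc => rc.2 - rc.1 == i)).map (fun rc => g rc.1 rc.2)
      = (PySem.List.pyRange 0 (gs - i) 1).map (fun j => g j (j + i)) := by
  rw [pv_cells_filter_map gs i (fun r c => c - r) g]
  have hcong : ∀ r ∈ PySem.List.pyRange 0 gs 1,
      ((PySem.List.pyRange 0 gs 1).filter (fun c => c - r == i)).map (fun c => g r c)
        = (if 0 ≤ r + i ∧ r + i < gs then [g r (r + i)] else []) := by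
    intro r _
    have : (PySem.List.pyRange 0 gs 1).filter (fun c => c - r == i)
        = (PySem.List.pyRange 0 gs 1).filter (fun c => c == r + i) := by
      apply List.filter_congr
      intro c _
      rw [Bool.eq_iff_iff]
      simp only [beq_iff_eq]
      omega
    rw [this, pv_filter_pyRange_eq]
    split <;> simp
  rw [List.flatMap_congr hcong]
  rw [PySem.List.pyRange_one_append 0 (gs - i) gs (by omega) (by omega), List.flatMap_append]
  have h1 : (PySem.List.pyRange 0 (gs - i) 1).flatMap
      (fun r => if 0 ≤ r + i ∧ r + i < gs then [g r (r + i)] else [])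
      = (PySem.List.pyRange 0 (gs - i) 1).map (fun j => g j (j + i)) := by
    rw [List.map_eq_flatMap]
    apply List.flatMap_congr
    intro r hr
    have := PySem.List.mem_pyRange_one.mp hr
    rw [if_pos (by omega)]
  have h2 : (PySem.List.pyRange (gs - i) gs 1).flatMap
      (fun r => if 0 ≤ r + i ∧ r + i < gs then [g r (r + i)] else []) = [] := by
    rw [List.flatMap_eq_nil_iff]
    intro r hr
    have := PySem.List.mem_pyRange_one.mp hr
    rw [if_neg (by omega)]
  rw [h1, h2, List.append_nil]

theorem pv_dd_bucket_neg (gs i : Int) (h1 : 1 ≤ i) (hi : i < gs) (g : Int → Int → Int) :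
    ((pvCells gs).filter (fun rc => rc.2 - rc.1 == -i)).map (fun rc => g rc.1 rc.2)
      = (PySem.List.pyRange 0 (gs - i) 1).map (fun j => g (j + i) j) := by
  rw [pv_cells_filter_map gs (-i) (fun r c => c - r) g]
  have hcong : ∀ r ∈ PySem.List.pyRange 0 gs 1,
      ((PySem.List.pyRange 0 gs 1).filter (fun c => c - r == -i)).map (fun c => g r c)
        = (if 0 ≤ r - i ∧ r - i < gs then [g r (r - i)] else []) := by
    intro r _
    have : (PySem.List.pyRange 0 gs 1).filter (fun c => c - r == -i)
        = (PySem.List.pyRange 0 gs 1).filter (fun c => c == r - i) := by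
      apply List.filter_congr
      intro c _
      rw [Bool.eq_iff_iff]
      simp only [beq_iff_eq]
      omega
    rw [this, pv_filter_pyRange_eq]
    split <;> simp
  rw [List.flatMap_congr hcong]
  rw [PySem.List.pyRange_one_append 0 i gs (by omega) (by omega), List.flatMap_append]
  have h2 : (PySem.List.pyRange 0 i 1).flatMap
      (fun r => if 0 ≤ r - i ∧ r - i < gs then [g r (r - i)] else []) = [] := by
    rw [List.flatMap_eq_nil_iff]
    intro r hr
    have := PySem.List.mem_pyRange_one.mp hr
    rw [if_neg (by omega)]
  have h3 : (PySem.List.pyRange i gs 1).flatMap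
      (fun r => if 0 ≤ r - i ∧ r - i < gs then [g r (r - i)] else [])
      = (PySem.List.pyRange i gs 1).map (fun r => g r (r - i)) := by
    rw [List.map_eq_flatMap]
    apply List.flatMap_congr
    intro r hr
    have := PySem.List.mem_pyRange_one.mp hr
    rw [if_pos (by omega)]
  rw [h2, h3, List.nil_append]
  rw [PySem.List.pyRange_one i gs, PySem.List.pyRange_one 0 (gs - i)]
  have : gs - i - 0 = gs - i := by omega
  rw [this]
  rw [List.map_map, List.map_map]
  apply List.map_congr_left
  intro k _
  simp only [Function.comp_apply]
  congr 1 <;> omega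

theorem pv_ad_bucket_low (gs i : Int) (h0 : 0 ≤ i) (hi : i < gs) (g : Int → Int → Int) :
    (((pvCells gs).filter (fun rc => rc.1 + rc.2 == i)).map (fun rc => g rc.1 rc.2)).reverse
      = (PySem.List.pyRange 0 (i + 1) 1).map (fun j => g (i - j) j) := by
  rw [pv_cells_filter_map gs i (fun r c => r + c) g]
  have hcong : ∀ r ∈ PySem.List.pyRange 0 gs 1,
      ((PySem.List.pyRange 0 gs 1).filter (fun c => r + c == i)).map (fun c => g r c)
        = (if 0 ≤ i - r ∧ i - r < gs then [g r (i - r)] else []) := by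
    intro r _
    have : (PySem.List.pyRange 0 gs 1).filter (fun c => r + c == i)
        = (PySem.List.pyRange 0 gs 1).filter (fun c => c == i - r) := by
      apply List.filter_congr
      intro c _
      rw [Bool.eq_iff_iff]
      simp only [beq_iff_eq]
      omega
    rw [this, pv_filter_pyRange_eq]
    split <;> simp
  rw [List.flatMap_congr hcong]
  rw [PySem.List.pyRange_one_append 0 (i + 1) gs (by omega) (by omega), List.flatMap_append]
  have h1 : (PySem.List.pyRange 0 (i + 1) 1).flatMap
      (fun r => if 0 ≤ i - r ∧ i - r < gs then [g r (i - r)] else [])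
      = (PySem.List.pyRange 0 (i + 1) 1).map (fun r => g r (i - r)) := by
    rw [List.map_eq_flatMap]
    apply List.flatMap_congr
    intro r hr
    have := PySem.List.mem_pyRange_one.mp hr
    rw [if_pos (by omega)]
  have h2 : (PySem.List.pyRange (i + 1) gs 1).flatMap
      (fun r => if 0 ≤ i - r ∧ i - r < gs then [g r (i - r)] else []) = [] := by
    rw [List.flatMap_eq_nil_iff]
    intro r hr
    have := PySem.List.mem_pyRange_one.mp hr
    rw [if_neg (by omega)]
  rw [h1, h2, List.append_nil, pv_reverse_map_pyRange]
  apply List.map_congr_left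
  intro x hx
  have := PySem.List.mem_pyRange_one.mp hx
  congr 1 <;> omega

theorem pv_ad_bucket_high (gs i : Int) (h1 : 1 ≤ i) (hi : i < gs) (g : Int → Int → Int) :
    (((pvCells gs).filter (fun rc => rc.1 + rc.2 == gs - 1 + i)).map (fun rc => g rc.1 rc.2)).reverse
      = (PySem.List.pyRange 0 (gs - i) 1).map (fun j => g (gs - 1 - j) (i + j)) := by
  rw [pv_cells_filter_map gs (gs - 1 + i) (fun r c => r + c) g]
  have hcong : ∀ r ∈ PySem.List.pyRange 0 gs 1,
      ((PySem.List.pyRange 0 gs 1).filter (fun c => r + c == gs - 1 + i)).map (fun c => g r c)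
        = (if 0 ≤ gs - 1 + i - r ∧ gs - 1 + i - r < gs then [g r (gs - 1 + i - r)] else []) := by
    intro r _
    have : (PySem.List.pyRange 0 gs 1).filter (fun c => r + c == gs - 1 + i)
        = (PySem.List.pyRange 0 gs 1).filter (fun c => c == gs - 1 + i - r) := by
      apply List.filter_congr
      intro c _
      rw [Bool.eq_iff_iff]
      simp only [beq_iff_eq]
      omega
    rw [this, pv_filter_pyRange_eq]
    split <;> simp
  rw [List.flatMap_congr hcong]
  rw [PySem.List.pyRange_one_append 0 i gs (by omega) (by omega), List.flatMap_append]
  have h2 : (PySem.List.pyRange 0 i 1).flatMap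
      (fun r => if 0 ≤ gs - 1 + i - r ∧ gs - 1 + i - r < gs then [g r (gs - 1 + i - r)] else []) = [] := by
    rw [List.flatMap_eq_nil_iff]
    intro r hr
    have := PySem.List.mem_pyRange_one.mp hr
    rw [if_neg (by omega)]
  have h3 : (PySem.List.pyRange i gs 1).flatMap
      (fun r => if 0 ≤ gs - 1 + i - r ∧ gs - 1 + i - r < gs then [g r (gs - 1 + i - r)] else [])
      = (PySem.List.pyRange i gs 1).map (fun r => g r (gs - 1 + i - r)) := by
    rw [List.map_eq_flatMap]
    apply List.flatMap_congr
    intro r hr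
    have := PySem.List.mem_pyRange_one.mp hr
    rw [if_pos (by omega)]
  rw [h2, h3, List.nil_append, pv_reverse_map_pyRange]
  rw [PySem.List.pyRange_one i gs, PySem.List.pyRange_one 0 (gs - i)]
  have he : gs - i - 0 = gs - i := by omega
  rw [he, List.map_map, List.map_map]
  apply List.map_congr_left
  intro k _
  simp only [Function.comp_apply]
  congr 1 <;> omega

theorem pv_chunks (n : Nat) (vals : List Int) (k : Nat) :
    (List.range n).foldl
        (fun (st : List (List Int) × List Int) _ =>
          (st.1 ++ [st.2.take k], st.2.drop k)) ([], vals)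
      = ((List.range n).map (fun j => (vals.drop (j * k)).take k), vals.drop (n * k)) := by
  induction n generalizing vals with
  | zero => simp
  | succ m ih =>
    rw [List.range_succ, List.foldl_append, ih, List.map_append]
    simp [List.drop_drop, Nat.succ_mul, Nat.add_comm]

theorem pvGrid_eq (gs rs : Int) :
    pvGrid gs rs
      = (PySem.List.pyRange 0 gs 1).map (fun j =>
          (((pvPseudoRandom gs rs).drop (j.toNat * rs.toNat)).take rs.toNat)) := by
  simp only [pvGrid]
  rw [PySem.List.pyRange_one 0 gs, List.foldl_map, pv_chunks]
  rw [List.map_map]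
  apply List.map_congr_left
  intro k _
  simp

theorem pv_map_grid (gs rs : Int) (f : List Int → Int) :
    (pvGrid gs rs).map f
      = (PySem.List.pyRange 0 gs 1).map (fun r => f (PySem.List.pyGetD (pvGrid gs rs) r [])) := by
  conv_lhs => rw [pvGrid_eq]
  rw [List.map_map]
  apply List.map_congr_left
  intro r hr
  obtain ⟨h0, h1⟩ := PySem.List.mem_pyRange_one.mp hr
  simp only [Function.comp_apply]
  congr 1
  rw [pvGrid_eq, PySem.List.pyGetD_map_pyRange_of_nonneg _ gs r [] h0 h1]

theorem pv_foldl_yield2 (l : List Int) (u w : Int → Int) (acc : List Int) :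
    l.foldl (fun acc i => (if i > 0 then acc ++ [u i] else acc) ++ [w i]) acc
      = acc ++ l.flatMap (fun i => (if i > 0 then [u i] else []) ++ [w i]) := by
  induction l generalizing acc with
  | nil => simp
  | cons x t ih =>
    simp only [List.foldl_cons, List.flatMap_cons, ih]
    split <;> simp

theorem pv_foldl_yield2' (l : List Int) (u w : Int → Int) (acc : List Int) :
    l.foldl (fun acc i => acc ++ [u i] ++ [w i]) acc
      = acc ++ l.flatMap (fun i => [u i] ++ [w i]) := by
  induction l generalizing acc with
  | nil => simp
  | cons _ t _ => simp [List.flatMap_def]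

theorem pv_A_norm (gs rs : Int) :
    traverse_square gs rs
      = (pvGrid gs rs).map pvMaxSub
        ++ (PySem.List.pyRange 0 gs 1).map (fun column =>
             pvMaxSub ((pvGrid gs rs).map (fun r => PySem.List.pyGetD r column 0)))
        ++ (PySem.List.pyRange 0 gs 1).flatMap (fun i =>
             (if i > 0 then [pvMaxSub ((PySem.List.pyRange 0 (gs - i) 1).map
                 (fun j => PySem.List.pyGetD (PySem.List.pyGetD (pvGrid gs rs) (j + i) []) j 0))] else [])
             ++ [pvMaxSub ((PySem.List.pyRange 0 (gs - i) 1).map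
                 (fun j => PySem.List.pyGetD (PySem.List.pyGetD (pvGrid gs rs) j []) (j + i) 0))])
        ++ (PySem.List.pyRange 0 gs 1).flatMap (fun i =>
             (if i > 0 then [pvMaxSub ((PySem.List.pyRange 0 (gs - i) 1).map
                 (fun j => PySem.List.pyGetD (PySem.List.pyGetD (pvGrid gs rs) (gs - 1 - j) []) (i + j) 0))] else [])
             ++ [pvMaxSub ((PySem.List.pyRange 0 (i + 1) 1).map
                 (fun j => PySem.List.pyGetD (PySem.List.pyGetD (pvGrid gs rs) (i - j) []) j 0))]) := by
  simp only [traverse_square]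
  rw [PySem.List.foldl_append_singleton_eq_map pvMaxSub (pvGrid gs rs) [], List.nil_append,
    PySem.List.foldl_append_singleton_eq_map, pv_foldl_yield2, pv_foldl_yield2]

def pvVal (gs rs r c : Int) : Int :=
  PySem.List.pyGetD (PySem.List.pyGetD (pvGrid gs rs) r []) c 0

def pvBCol (gs rs q : Int) : List Int :=
  ((pvCells gs).filter (fun rc => rc.2 == q)).map (fun rc => pvVal gs rs rc.1 rc.2)

def pvBDD (gs rs q : Int) : List Int :=
  ((pvCells gs).filter (fun rc => rc.2 - rc.1 == q)).map (fun rc => pvVal gs rs rc.1 rc.2)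

def pvBAD (gs rs q : Int) : List Int :=
  ((pvCells gs).filter (fun rc => rc.1 + rc.2 == q)).map (fun rc => pvVal gs rs rc.1 rc.2)

theorem pv_B_norm (gs rs : Int) (h : 0 < gs) :
    traverse_square_alt gs rs
      = (pvGrid gs rs).map pvMaxSub
        ++ (PySem.List.pyRange 0 gs 1).map (fun c => pvMaxSub (pvBCol gs rs c))
        ++ ([pvMaxSub (pvBDD gs rs 0)]
            ++ (PySem.List.pyRange 1 gs 1).flatMap (fun i =>
                 [pvMaxSub (pvBDD gs rs (-i))] ++ [pvMaxSub (pvBDD gs rs i)]))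
        ++ ([pvMaxSub ((pvBAD gs rs 0).reverse)]
            ++ (PySem.List.pyRange 1 gs 1).flatMap (fun i =>
                 [pvMaxSub ((pvBAD gs rs (gs - 1 + i)).reverse)]
                   ++ [pvMaxSub ((pvBAD gs rs i).reverse)])) := by
  simp only [traverse_square_alt]
  rw [if_pos h]
  rw [pv_foldl_nested (PySem.List.pyRange 0 gs 1) (PySem.List.pyRange 0 gs 1)
    (fun (st : PySem.Dict Int (List Int) × PySem.Dict Int (List Int) × PySem.Dict Int (List Int)) r c =>
      (st.1.modify c [] (fun b => b ++ [PySem.List.pyGetD (PySem.List.pyGetD (pvGrid gs rs) r []) c 0]),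
       st.2.1.modify (c - r) [] (fun b => b ++ [PySem.List.pyGetD (PySem.List.pyGetD (pvGrid gs rs) r []) c 0]),
       st.2.2.modify (r + c) [] (fun b => b ++ [PySem.List.pyGetD (PySem.List.pyGetD (pvGrid gs rs) r []) c 0])))
    (PySem.Dict.empty, PySem.Dict.empty, PySem.Dict.empty)]
  rw [pv_foldl_prod3 ((PySem.List.pyRange 0 gs 1).flatMap (fun r => (PySem.List.pyRange 0 gs 1).map (fun c => (r, c))))
    (fun (d : PySem.Dict Int (List Int)) (rc : Int × Int) =>
      d.modify rc.2 [] (fun b => b ++ [PySem.List.pyGetD (PySem.List.pyGetD (pvGrid gs rs) rc.1 []) rc.2 0]))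
    (fun (d : PySem.Dict Int (List Int)) (rc : Int × Int) =>
      d.modify (rc.2 - rc.1) [] (fun b => b ++ [PySem.List.pyGetD (PySem.List.pyGetD (pvGrid gs rs) rc.1 []) rc.2 0]))
    (fun (d : PySem.Dict Int (List Int)) (rc : Int × Int) =>
      d.modify (rc.1 + rc.2) [] (fun b => b ++ [PySem.List.pyGetD (PySem.List.pyGetD (pvGrid gs rs) rc.1 []) rc.2 0]))
    PySem.Dict.empty PySem.Dict.empty PySem.Dict.empty]
  have hcol : ∀ q : Int,
      (((PySem.List.pyRange 0 gs 1).flatMap (fun r => (PySem.List.pyRange 0 gs 1).map (fun c => (r, c)))).foldl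
        (fun (d : PySem.Dict Int (List Int)) (rc : Int × Int) =>
          d.modify rc.2 [] (fun b => b ++ [PySem.List.pyGetD (PySem.List.pyGetD (pvGrid gs rs) rc.1 []) rc.2 0]))
        PySem.Dict.empty).getD q [] = pvBCol gs rs q := by
    intro q
    rw [pv_getD_bucketFold]
    rfl
  have hdd : ∀ q : Int,
      (((PySem.List.pyRange 0 gs 1).flatMap (fun r => (PySem.List.pyRange 0 gs 1).map (fun c => (r, c)))).foldl
        (fun (d : PySem.Dict Int (List Int)) (rc : Int × Int) =>
          d.modify (rc.2 - rc.1) [] (fun b => b ++ [PySem.List.pyGetD (PySem.List.pyGetD (pvGrid gs rs) rc.1 []) rc.2 0]))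
        PySem.Dict.empty).getD q [] = pvBDD gs rs q := by
    intro q
    rw [pv_getD_bucketFold]
    rfl
  have had : ∀ q : Int,
      (((PySem.List.pyRange 0 gs 1).flatMap (fun r => (PySem.List.pyRange 0 gs 1).map (fun c => (r, c)))).foldl
        (fun (d : PySem.Dict Int (List Int)) (rc : Int × Int) =>
          d.modify (rc.1 + rc.2) [] (fun b => b ++ [PySem.List.pyGetD (PySem.List.pyGetD (pvGrid gs rs) rc.1 []) rc.2 0]))
        PySem.Dict.empty).getD q [] = pvBAD gs rs q := by
    intro q
    rw [pv_getD_bucketFold]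
    rfl
  simp only [hcol, hdd, had]
  rw [pv_foldl_yield2', pv_foldl_yield2']
  simp [List.append_assoc]

theorem pv_main_nonpos (gs rs : Int) (h : gs ≤ 0) :
    traverse_square gs rs = traverse_square_alt gs rs := by
  simp [traverse_square, traverse_square_alt, pvGrid,
    PySem.List.pyRange_one_eq_nil h, show ¬ gs > 0 by omega]

theorem pv_main_pos (gs rs : Int) (h : 0 < gs) :
    traverse_square gs rs = traverse_square_alt gs rs := by
  rw [pv_A_norm, pv_B_norm gs rs h]
  have hone : PySem.List.pyRange 0 1 1 = [0] := rfl
  have h2 : (PySem.List.pyRange 0 gs 1).map (fun column =>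
        pvMaxSub ((pvGrid gs rs).map (fun r => PySem.List.pyGetD r column 0)))
      = (PySem.List.pyRange 0 gs 1).map (fun c => pvMaxSub (pvBCol gs rs c)) := by
    apply List.map_congr_left
    intro q hq
    obtain ⟨h0, h1⟩ := PySem.List.mem_pyRange_one.mp hq
    congr 1
    rw [pv_map_grid gs rs (fun row => PySem.List.pyGetD row q 0)]
    rw [show pvBCol gs rs q = ((pvCells gs).filter (fun rc => rc.2 == q)).map
      (fun rc => pvVal gs rs rc.1 rc.2) from rfl]
    rw [pv_cols_bucket gs q h0 h1 (pvVal gs rs)]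
    rfl
  have h3 : (PySem.List.pyRange 0 gs 1).flatMap (fun i =>
        (if i > 0 then [pvMaxSub ((PySem.List.pyRange 0 (gs - i) 1).map
            (fun j => PySem.List.pyGetD (PySem.List.pyGetD (pvGrid gs rs) (j + i) []) j 0))] else [])
        ++ [pvMaxSub ((PySem.List.pyRange 0 (gs - i) 1).map
            (fun j => PySem.List.pyGetD (PySem.List.pyGetD (pvGrid gs rs) j []) (j + i) 0))])
      = [pvMaxSub (pvBDD gs rs 0)]
        ++ (PySem.List.pyRange 1 gs 1).flatMap (fun i =>
             [pvMaxSub (pvBDD gs rs (-i))] ++ [pvMaxSub (pvBDD gs rs i)]) := by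
    rw [PySem.List.pyRange_one_append 0 1 gs (by omega) (by omega), List.flatMap_append, hone]
    congr 1
    · have hd0 : pvBDD gs rs 0 = (PySem.List.pyRange 0 (gs - 0) 1).map
          (fun j => pvVal gs rs j (j + 0)) := by
        rw [show pvBDD gs rs 0 = ((pvCells gs).filter (fun rc => rc.2 - rc.1 == 0)).map
          (fun rc => pvVal gs rs rc.1 rc.2) from rfl]
        exact pv_dd_bucket_pos gs 0 le_rfl h (pvVal gs rs)
      simp [hd0, pvVal]
    · apply List.flatMap_congr
      intro i hi
      obtain ⟨hi1, hi2⟩ := PySem.List.mem_pyRange_one.mp hi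
      rw [if_pos (by omega)]
      have hdn : pvBDD gs rs (-i) = (PySem.List.pyRange 0 (gs - i) 1).map
          (fun j => pvVal gs rs (j + i) j) := pv_dd_bucket_neg gs i hi1 hi2 (pvVal gs rs)
      have hdp : pvBDD gs rs i = (PySem.List.pyRange 0 (gs - i) 1).map
          (fun j => pvVal gs rs j (j + i)) := pv_dd_bucket_pos gs i (by omega) hi2 (pvVal gs rs)
      simp [hdn, hdp, pvVal]
  have h4 : (PySem.List.pyRange 0 gs 1).flatMap (fun i =>
        (if i > 0 then [pvMaxSub ((PySem.List.pyRange 0 (gs - i) 1).map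
            (fun j => PySem.List.pyGetD (PySem.List.pyGetD (pvGrid gs rs) (gs - 1 - j) []) (i + j) 0))] else [])
        ++ [pvMaxSub ((PySem.List.pyRange 0 (i + 1) 1).map
            (fun j => PySem.List.pyGetD (PySem.List.pyGetD (pvGrid gs rs) (i - j) []) j 0))])
      = [pvMaxSub ((pvBAD gs rs 0).reverse)]
        ++ (PySem.List.pyRange 1 gs 1).flatMap (fun i =>
             [pvMaxSub ((pvBAD gs rs (gs - 1 + i)).reverse)]
               ++ [pvMaxSub ((pvBAD gs rs i).reverse)]) := by
    rw [PySem.List.pyRange_one_append 0 1 gs (by omega) (by omega), List.flatMap_append, hone]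
    congr 1
    · have ha0 : (pvBAD gs rs 0).reverse = (PySem.List.pyRange 0 (0 + 1) 1).map
          (fun j => pvVal gs rs (0 - j) j) := pv_ad_bucket_low gs 0 le_rfl h (pvVal gs rs)
      simp [ha0, pvVal]
    · apply List.flatMap_congr
      intro i hi
      obtain ⟨hi1, hi2⟩ := PySem.List.mem_pyRange_one.mp hi
      rw [if_pos (by omega)]
      have hah : (pvBAD gs rs (gs - 1 + i)).reverse = (PySem.List.pyRange 0 (gs - i) 1).map
          (fun j => pvVal gs rs (gs - 1 - j) (i + j)) := pv_ad_bucket_high gs i hi1 hi2 (pvVal gs rs)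
      have hal : (pvBAD gs rs i).reverse = (PySem.List.pyRange 0 (i + 1) 1).map
          (fun j => pvVal gs rs (i - j) j) := pv_ad_bucket_low gs i (by omega) hi2 (pvVal gs rs)
      simp [hah, hal, pvVal]
  rw [h2, h3, h4]

-- ===== VERDICT (by name: the statement is the Claim_ definition above) =====
theorem traverse_square_spec : Claim_equal_traverse_square := by
  intro gs rs _ _
  unfold Spec_traverse_square
  by_cases h : gs ≤ 0
  · exact pv_main_nonpos gs rs h
  · exact pv_main_pos gs rs (by omega)
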